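-- pv_equiv track=rewrite | github.com/equinor/gordo | gordo/cli/exceptions_reporter.py | trim_formatted_traceback
-- ===== SOURCE A (Python) =====
-- from typing import Tuple, Iterable, Type, IO, Optional, List, Dict
--
-- def trim_formatted_traceback(
--     formatted_traceback: List[str], max_length: int
-- ) -> List[str]:
--     if sum(len(line) for line in formatted_traceback) <= max_length:
--         return formatted_traceback
--     length = 4
--     result = []
--     for line in reversed(formatted_traceback):
--         length += len(line)
--         if length > max_length:
--             result.append("...\n")
--             break
--         else:
--             result.append(line)
--     return list(reversed(result))
-- ===== SOURCE B (Python) =====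
-- def trim_formatted_traceback(formatted_traceback, max_length):
--     if not formatted_traceback:
--         return formatted_traceback
--     total = sum(len(line) for line in formatted_traceback)
--     if total <= max_length:
--         return formatted_traceback
--     drop_needed = total - (max_length - 4)
--     start = len(formatted_traceback)
--     dropped = 0
--     for i, line in enumerate(formatted_traceback):
--         dropped += len(line)
--         if dropped >= drop_needed:
--             start = i + 1
--             break
--     return ["...\n"] + formatted_traceback[start:]
-- ===== Notes on version B (the rewrite author's own statement) =====
-- stated objective: alternative
-- what changed: Replaces the back-to-front append-and-reverse loop with a forward scan that accumulates how many characters must be dropped from the front, finds the cutoff index, and returns the sentinel plus a single slice.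
import Mathlib
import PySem

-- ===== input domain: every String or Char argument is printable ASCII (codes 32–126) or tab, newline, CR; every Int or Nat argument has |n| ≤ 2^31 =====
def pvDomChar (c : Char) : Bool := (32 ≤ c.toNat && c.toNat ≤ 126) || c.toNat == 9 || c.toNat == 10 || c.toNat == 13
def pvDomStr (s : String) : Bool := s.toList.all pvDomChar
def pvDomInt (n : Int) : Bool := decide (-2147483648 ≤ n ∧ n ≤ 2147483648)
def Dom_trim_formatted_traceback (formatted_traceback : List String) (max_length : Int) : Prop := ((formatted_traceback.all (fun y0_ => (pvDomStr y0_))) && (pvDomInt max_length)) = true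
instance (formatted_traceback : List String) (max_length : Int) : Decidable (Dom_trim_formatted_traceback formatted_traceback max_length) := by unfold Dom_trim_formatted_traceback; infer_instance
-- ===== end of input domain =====

-- B replaces A's back-to-front append-and-reverse loop by a forward scan for a cutoff index plus one slice (alternative decomposition, same cost).


-- ===== PORT A =====
-- the for-loop over reversed(formatted_traceback) with `length`, `result` and break
def pvA_loop (max_length : Int) : List String → Int → List String → List String
  | [], _, result => result
  | line :: rest, length, result =>
    let length := length + PySem.Str.len line
    if length > max_length then result ++ ["...\n"]
    else pvA_loop max_length rest length (result ++ [line])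

def trim_formatted_traceback (formatted_traceback : List String) (max_length : Int) : List String :=
  if formatted_traceback.foldl (fun a line => a + PySem.Str.len line) 0 ≤ max_length then
    formatted_traceback
  else
    (pvA_loop max_length formatted_traceback.reverse 4 []).reverse

-- ===== PORT B =====
-- forward scan: accumulate dropped characters, break at the cutoff index `i + 1`
def pvB_scan (drop_needed : Int) : List String → Nat → Int → Nat
  | [], i, _ => i
  | line :: rest, i, dropped =>
    let dropped := dropped + PySem.Str.len line
    if drop_needed ≤ dropped then i + 1
    else pvB_scan drop_needed rest (i + 1) dropped

def trim_formatted_traceback_alt (formatted_traceback : List String) (max_length : Int) : List String :=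
  if formatted_traceback = [] then formatted_traceback
  else
    let total := formatted_traceback.foldl (fun a line => a + PySem.Str.len line) 0
    if total ≤ max_length then formatted_traceback
    else
      let drop_needed := total - (max_length - 4)
      -- start defaults to len(formatted_traceback); pvB_scan returns it when no break fires
      let start := pvB_scan drop_needed formatted_traceback (formatted_traceback.length - formatted_traceback.length) 0
      -- formatted_traceback[start:] with 0 ≤ start : List.drop is exact here
      "...\n" :: formatted_traceback.drop start

-- ===== PRECONDITION & SPEC =====
def Spec_trim_formatted_traceback (formatted_traceback : List String) (max_length : Int) (out : List String) : Prop := out = trim_formatted_traceback_alt formatted_traceback max_length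
instance (formatted_traceback : List String) (max_length : Int) (out : List String) : Decidable (Spec_trim_formatted_traceback formatted_traceback max_length out) := by unfold Spec_trim_formatted_traceback; infer_instance

-- ===== CLAIM (what is proved, stated in full; the proofs are below) =====
def Claim_equal_trim_formatted_traceback : Prop := ∀ (formatted_traceback : List String) (max_length : Int), Dom_trim_formatted_traceback formatted_traceback max_length → Spec_trim_formatted_traceback formatted_traceback max_length (trim_formatted_traceback formatted_traceback max_length)

-- ===== LEMMAS AND PROOFS =====

-- total character count of a list of lines
def pvT (xs : List String) : Int := (xs.map PySem.Str.len).sum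

theorem pvLen_nonneg (s : String) : 0 ≤ PySem.Str.len s := by
  simp [PySem.Str.len_eq]

theorem pvT_nil : pvT [] = 0 := by simp [pvT]

theorem pvT_cons (l : String) (r : List String) :
    pvT (l :: r) = PySem.Str.len l + pvT r := by simp [pvT]

theorem pvT_nonneg (xs : List String) : 0 ≤ pvT xs := by
  induction xs with
  | nil => simp [pvT]
  | cons l r ih =>
    rw [pvT_cons]
    have := pvLen_nonneg l
    omega

theorem pvT_reverse (xs : List String) : pvT xs.reverse = pvT xs := by simp [pvT]

theorem pv_foldl_eq_T (xs : List String) (a : Int) :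
    xs.foldl (fun a line => a + PySem.Str.len line) a = a + pvT xs := by
  induction xs generalizing a with
  | nil => simp [pvT]
  | cons l r ih => simp only [List.foldl_cons, ih, pvT, List.map_cons, List.sum_cons]; ring

-- the result accumulator of A's loop is a pure prefix
theorem pvA_loop_acc (ml : Int) (xs : List String) (c : Int) (res : List String) :
    pvA_loop ml xs c res = res ++ pvA_loop ml xs c [] := by
  induction xs generalizing c res with
  | nil => simp [pvA_loop]
  | cons l r ih =>
    simp only [pvA_loop]
    split
    · simp
    · rw [ih, ih (res := [] ++ [l])]; simp

-- break inside xs: the tail ys is never reached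
theorem pvA_loop_break (ml : Int) (xs ys : List String) : ∀ c : Int, xs ≠ [] →
    ml < c + pvT xs → pvA_loop ml (xs ++ ys) c [] = pvA_loop ml xs c [] := by
  induction xs with
  | nil => intro c hne _; exact absurd rfl hne
  | cons l r ih =>
    intro c _ h
    rw [pvT_cons] at h
    simp only [List.cons_append, pvA_loop]
    split
    · rfl
    · rename_i hfit
      cases r with
      | nil =>
        exfalso
        rw [pvT_nil] at h
        omega
      | cons a b =>
        rw [pvA_loop_acc, pvA_loop_acc (res := [] ++ [l])]
        rw [ih (c + PySem.Str.len l) (by simp) (by omega)]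

-- the break at the very last element of the reversed list appends only the sentinel
theorem pvA_loop_last (ml : Int) (r : List String) (l : String) : ∀ c : Int,
    c + pvT r ≤ ml → ml < c + pvT r + PySem.Str.len l →
    pvA_loop ml (r.reverse ++ [l]) c [] = r.reverse ++ ["...\n"] := by
  induction r using List.reverseRecOn with
  | nil =>
    intro c h1 h2
    rw [pvT_nil] at h1 h2
    simp only [List.reverse_nil, List.nil_append, pvA_loop]
    rw [if_pos (by omega)]
  | append_singleton ys y ihr =>
    intro c h1 h2
    have hy := pvLen_nonneg y
    have hys := pvT_nonneg ys
    have hxy : pvT (ys ++ [y]) = pvT ys + PySem.Str.len y := by simp [pvT]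
    rw [hxy] at h1 h2
    simp only [List.reverse_append, List.reverse_singleton,
      List.cons_append, pvA_loop]
    rw [if_neg (by omega)]
    rw [pvA_loop_acc]
    simp only [List.nil_append]
    rw [ihr (c + PySem.Str.len y) (by omega) (by omega)]
    simp

-- B's scan: the index accumulator is an offset
theorem pvB_scan_acc (dn : Int) (xs : List String) (i : Nat) (d : Int) :
    pvB_scan dn xs i d = i + pvB_scan dn xs 0 d := by
  induction xs generalizing i d with
  | nil => simp [pvB_scan]
  | cons l r ih =>
    simp only [pvB_scan]
    split
    · rfl
    · rw [ih (i + 1), ih 1]; omega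

-- B's scan depends only on dn - d
theorem pvB_scan_shift (dn : Int) (xs : List String) (d : Int) :
    pvB_scan dn xs 0 d = pvB_scan (dn - d) xs 0 0 := by
  induction xs generalizing dn d with
  | nil => simp [pvB_scan]
  | cons l r ih =>
    simp only [pvB_scan]
    by_cases hc : dn ≤ d + PySem.Str.len l
    · rw [if_pos hc, if_pos (by omega : dn - d ≤ 0 + PySem.Str.len l)]
    · rw [if_neg hc, if_neg (by omega : ¬ dn - d ≤ 0 + PySem.Str.len l)]
      rw [pvB_scan_acc _ _ (0 + 1), pvB_scan_acc _ _ (0 + 1)]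
      rw [ih dn (d + PySem.Str.len l), ih (dn - d) (0 + PySem.Str.len l)]
      have h3 : dn - (d + PySem.Str.len l) = dn - d - (0 + PySem.Str.len l) := by omega
      rw [h3]

-- MAIN: on an overflowing list, A's reversed loop result is the sentinel plus the suffix B slices
theorem pv_main (ml : Int) (xs : List String) : ∀ c : Int, xs ≠ [] →
    ml < c + pvT xs →
    (pvA_loop ml xs.reverse c []).reverse
      = "...\n" :: xs.drop (pvB_scan (pvT xs - (ml - c)) xs 0 0) := by
  induction xs with
  | nil => intro c hne _; exact absurd rfl hne
  | cons l r ih =>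
    intro c _ h
    have hl := pvLen_nonneg l
    have hr := pvT_nonneg r
    have hx := pvT_cons l r
    simp only [List.reverse_cons]
    by_cases hrb : r ≠ [] ∧ ml < c + pvT r
    · -- break happens within r (before reaching l at the end of the reversed list)
      obtain ⟨hrne, hrovf⟩ := hrb
      have hrevne : r.reverse ≠ [] := by simpa using hrne
      rw [pvA_loop_break ml r.reverse [l] c hrevne (by rw [pvT_reverse]; omega)]
      rw [ih c hrne hrovf]
      simp only [pvB_scan]
      rw [if_neg (by omega)]
      rw [pvB_scan_acc _ _ (0 + 1)]
      rw [pvB_scan_shift (pvT (l :: r) - (ml - c)) r (0 + PySem.Str.len l)]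
      have h4 : pvT (l :: r) - (ml - c) - (0 + PySem.Str.len l) = pvT r - (ml - c) := by omega
      rw [h4]
      rw [show (0 + 1 + pvB_scan (pvT r - (ml - c)) r 0 0)
            = (pvB_scan (pvT r - (ml - c)) r 0 0) + 1 from by omega]
      rw [List.drop_succ_cons]
    · -- the break happens exactly at l (the last element of the reversed list): cutoff index 1
      cases r with
      | nil =>
        rw [pvT_nil] at hx
        simp only [List.reverse_nil, List.nil_append, pvA_loop, pvB_scan]
        rw [if_pos (by omega)]
        simp
      | cons a b =>
        have hfit : c + pvT (a :: b) ≤ ml := by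
          rcases not_and_or.mp hrb with h1 | h2
          · exact absurd (by simp) h1
          · omega
        rw [pvA_loop_last ml (a :: b) l c hfit (by omega)]
        simp only [pvB_scan]
        rw [if_pos (by omega)]
        simp

-- ===== VERDICT (by name: the statement is the Claim_ definition above) =====
theorem trim_formatted_traceback_spec : Claim_equal_trim_formatted_traceback := by
  intro ft ml _
  unfold Spec_trim_formatted_traceback trim_formatted_traceback trim_formatted_traceback_alt
  by_cases hft : ft = []
  · subst hft; simp [pvA_loop]
  · rw [if_neg hft]
    rw [pv_foldl_eq_T]
    by_cases hle : 0 + pvT ft ≤ ml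
    · rw [if_pos hle, if_pos hle]
    · rw [if_neg hle, if_neg hle]
      have h0 : ft.length - ft.length = 0 := by omega
      rw [h0]
      rw [pv_main ml ft 4 hft (by have := pvT_nonneg ft; omega)]
      have h5 : 0 + pvT ft - (ml - 4) = pvT ft - (ml - 4) := by omega
      rw [h5]
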